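-- pv_equiv track=rewrite | github.com/googlarz/deterministic-workflow-builder-skill | scripts/auto_harden_workflow.py | infer_kind_from_steps
-- ===== SOURCE A (Python) =====
-- def infer_kind_from_steps(step_names: list[str]) -> str:
--     joined = " ".join(step_names)
--     if any(token in joined for token in ("publish", "release", "deploy")):
--         return "release"
--     if any(token in joined for token in ("test", "candidate-fixes", "reproduce")):
--         return "code-fix"
--     if any(token in joined for token in ("draft", "variants", "content")):
--         return "content-review"
--     if any(token in joined for token in ("extract", "transform", "load", "reconcile")):
--         return "etl"
--     return "generic"
-- ===== SOURCE B (Python) =====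
-- _KINDS = ("release", "code-fix", "content-review", "etl", "generic")
--
-- _TOKEN_RANK = {
--     "publish": 0, "release": 0, "deploy": 0,
--     "test": 1, "candidate-fixes": 1, "reproduce": 1,
--     "draft": 2, "variants": 2, "content": 2,
--     "extract": 3, "transform": 3, "load": 3, "reconcile": 3,
-- }
--
--
-- def infer_kind_from_steps(step_names: list[str]) -> str:
--     # No token contains a space, so a token occurs in " ".join(step_names) iff it
--     # occurs inside some individual step name: stream the names once, keeping the
--     # lowest (highest-priority) category rank seen so far, without ever joining.
--     best = 4
--     for name in step_names:
--         for token, rank in _TOKEN_RANK.items():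
--             if rank < best and token in name:
--                 best = rank
--     return _KINDS[best]
-- ===== Notes on version B (the rewrite author's own statement) =====
-- stated objective: alternative
-- what changed: B never builds the joined string: it streams the step names one by one, maintaining the minimum category rank found so far via a flat token-to-rank map (correct because no keyword contains a space, so a keyword occurs in ' '.join(names) iff it occurs in some individual name), then indexes a kind table by the final rank.
import Mathlib
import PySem

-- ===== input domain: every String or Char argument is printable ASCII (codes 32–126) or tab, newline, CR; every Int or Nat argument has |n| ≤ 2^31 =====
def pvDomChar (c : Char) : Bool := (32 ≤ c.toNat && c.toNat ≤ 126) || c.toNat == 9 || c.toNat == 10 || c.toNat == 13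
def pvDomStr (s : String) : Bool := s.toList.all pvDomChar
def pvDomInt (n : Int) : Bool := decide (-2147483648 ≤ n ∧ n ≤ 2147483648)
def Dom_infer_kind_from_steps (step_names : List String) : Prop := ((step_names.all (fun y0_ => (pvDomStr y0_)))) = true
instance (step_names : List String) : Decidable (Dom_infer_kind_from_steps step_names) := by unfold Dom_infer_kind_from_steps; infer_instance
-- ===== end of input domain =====

-- B never builds the joined string: it streams the names once keeping the minimum category
-- rank via a flat token→rank table (no keyword contains a space, so joining cannot create
-- a match across a boundary); an alternative decomposition of the same cost.

-- ===== PORT A =====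
def infer_kind_from_steps (step_names : List String) : String :=
  let joined := PySem.Str.join " " step_names
  if ["publish", "release", "deploy"].any (fun token => PySem.Str.isIn token joined) then
    "release"
  else if ["test", "candidate-fixes", "reproduce"].any (fun token => PySem.Str.isIn token joined) then
    "code-fix"
  else if ["draft", "variants", "content"].any (fun token => PySem.Str.isIn token joined) then
    "content-review"
  else if ["extract", "transform", "load", "reconcile"].any (fun token => PySem.Str.isIn token joined) then
    "etl"
  else
    "generic"

-- ===== PORT B =====
def pvKinds : List String := ["release", "code-fix", "content-review", "etl", "generic"]

def pvTokenRank : List (String × Nat) :=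
  [("publish", 0), ("release", 0), ("deploy", 0),
   ("test", 1), ("candidate-fixes", 1), ("reproduce", 1),
   ("draft", 2), ("variants", 2), ("content", 2),
   ("extract", 3), ("transform", 3), ("load", 3), ("reconcile", 3)]

-- the inner 'if rank < best and token in name: best = rank' of Source B
def pvGStep (name : String) (best : Nat) (tr : String × Nat) : Nat :=
  if tr.2 < best && PySem.Str.isIn tr.1 name then tr.2 else best

def infer_kind_from_steps_alt (step_names : List String) : String :=
  let best := step_names.foldl (fun best name => pvTokenRank.foldl (pvGStep name) best) 4
  -- _KINDS[best]; best ≤ 4 always, so the index is in range and the default is never used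
  (PySem.List.pyGet? pvKinds (Int.ofNat best)).getD "generic"

-- ===== PRECONDITION & SPEC =====
def Spec_infer_kind_from_steps (step_names : List String) (out : String) : Prop := out = infer_kind_from_steps_alt step_names
instance (step_names : List String) (out : String) : Decidable (Spec_infer_kind_from_steps step_names out) := by unfold Spec_infer_kind_from_steps; infer_instance

-- ===== CLAIM (what is proved, stated in full; the proofs are below) =====
def Claim_equal_infer_kind_from_steps : Prop := ∀ (step_names : List String), Dom_infer_kind_from_steps step_names → Spec_infer_kind_from_steps step_names (infer_kind_from_steps step_names)

-- ===== LEMMAS AND PROOFS =====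

-- A space-free pattern that is a prefix of a ++ ' '::b is a prefix of a.
theorem pv_prefix_no_sep {sub a b : List Char} (h : ' ' ∉ sub) :
    sub <+: a ++ ' ' :: b → sub <+: a := by
  induction sub generalizing a with
  | nil => intro _; exact List.nil_prefix
  | cons c cs ih =>
    cases a with
    | nil =>
      intro hp
      rw [List.nil_append, List.cons_prefix_cons] at hp
      exact absurd (hp.1 ▸ List.mem_cons_self) h
    | cons x a' =>
      intro hp
      rw [List.cons_append, List.cons_prefix_cons] at hp
      rw [List.cons_prefix_cons]
      exact ⟨hp.1, ih (fun hm => h (List.mem_cons_of_mem _ hm)) hp.2⟩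

-- A space-free infix of a ++ ' '::b lies entirely in a or in b.
theorem pv_infix_split {sub a b : List Char} (h : ' ' ∉ sub) :
    sub <:+: a ++ ' ' :: b → sub <:+: a ∨ sub <:+: b := by
  intro hi
  obtain ⟨j, hp⟩ := (PySem.Chars.exists_prefix_drop_iff_isIn sub (a ++ ' ' :: b)).mpr
      ((PySem.Chars.isIn_iff_infix _ _).mpr hi)
  rw [List.drop_append] at hp
  by_cases hj : j ≤ a.length
  · left
    have h0 : j - a.length = 0 := by omega
    rw [h0, List.drop_zero] at hp
    exact (pv_prefix_no_sep h hp).isInfix.trans (List.drop_suffix j a).isInfix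
  · right
    have ha : a.drop j = [] := List.drop_eq_nil_of_le (by omega)
    obtain ⟨k, hk⟩ : ∃ k, j - a.length = k + 1 := ⟨j - a.length - 1, by omega⟩
    rw [ha, hk, List.nil_append, List.drop_succ_cons] at hp
    exact hp.isInfix.trans (List.drop_suffix k b).isInfix

theorem pv_any_or3 (names : List String) (p q r : String → Bool) :
    names.any (fun n => p n || (q n || (r n || false)))
      = (names.any p || (names.any q || (names.any r || false))) := by
  rw [Bool.eq_iff_iff]
  simp only [List.any_eq_true, Bool.or_eq_true, Bool.or_false]
  aesop

theorem pv_any_or4 (names : List String) (p q r s : String → Bool) :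
    names.any (fun n => p n || (q n || (r n || (s n || false))))
      = (names.any p || (names.any q || (names.any r || (names.any s || false)))) := by
  rw [Bool.eq_iff_iff]
  simp only [List.any_eq_true, Bool.or_eq_true, Bool.or_false]
  aesop

-- A space-free, non-empty token occurs in the " "-join iff it occurs in one of the parts.
theorem pv_isIn_join_chars (sub : List Char) (h1 : sub ≠ []) (h2 : ' ' ∉ sub) (ls : List (List Char)) :
    PySem.Chars.isIn sub (PySem.Chars.join [' '] ls) = ls.any (fun l => PySem.Chars.isIn sub l) := by
  induction ls with
  | nil =>
    rw [PySem.Chars.join_nil, List.any_nil, PySem.Chars.isIn_eq_false_iff]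
    intro hc
    exact h1 (List.eq_nil_of_infix_nil hc)
  | cons l rest ih =>
    cases rest with
    | nil => rw [PySem.Chars.join_singleton]; simp
    | cons l2 r2 =>
      rw [PySem.Chars.join_cons_cons]
      have hre : l ++ [' '] ++ PySem.Chars.join [' '] (l2 :: r2)
          = l ++ ' ' :: PySem.Chars.join [' '] (l2 :: r2) := by simp
      rw [hre, Bool.eq_iff_iff, PySem.Chars.isIn_iff_infix, List.any_cons, Bool.or_eq_true,
        ← ih, PySem.Chars.isIn_iff_infix, PySem.Chars.isIn_iff_infix]
      constructor
      · intro hin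
        exact pv_infix_split h2 hin
      · intro hin
        rcases hin with h | h
        · exact h.trans (List.prefix_append _ _).isInfix
        · exact h.trans ((List.suffix_cons ' ' _).trans (List.suffix_append _ _)).isInfix

theorem pv_isIn_join (tok : String) (h1 : tok.toList ≠ []) (h2 : ' ' ∉ tok.toList)
    (names : List String) :
    PySem.Str.isIn tok (PySem.Str.join " " names)
      = names.any (fun n => PySem.Str.isIn tok n) := by
  rw [PySem.Str.isIn_eq, PySem.Str.toList_join]
  have : (" ".toList : List Char) = [' '] := rfl
  rw [this, pv_isIn_join_chars tok.toList h1 h2]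
  simp [List.any_map, Function.comp_def]

-- the inner loop over one category (all ranks equal): first-match = min with the rank
theorem pv_catfold (name : String) (r : Nat) (l : List String) : ∀ b : Nat,
    (l.map (fun t => (t, r))).foldl (pvGStep name) b
      = if l.any (fun t => PySem.Str.isIn t name) then min b r else b := by
  induction l with
  | nil => intro b; simp
  | cons t l ih =>
    intro b
    simp only [List.map_cons, List.foldl_cons, List.any_cons]
    by_cases ht : PySem.Str.isIn t name = true
    case neg =>
      have ht' : PySem.Str.isIn t name = false := eq_false_of_ne_true ht
      have hstep : pvGStep name b (t, r) = b := by
        unfold pvGStep; rw [ht']; simp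
      rw [hstep, ih]
      simp only [ht', Bool.false_or]
    case pos =>
      have hstep : pvGStep name b (t, r) = min b r := by
        unfold pvGStep; rw [ht]
        simp only [Bool.and_true, decide_eq_true_eq]
        split_ifs with h
        · exact (Nat.min_eq_right (Nat.le_of_lt h)).symm
        · exact (Nat.min_eq_left (Nat.le_of_not_lt h)).symm
      rw [hstep, ih]
      simp only [ht, Bool.true_or]
      rw [if_pos trivial]
      by_cases ha : (l.any fun t => PySem.Str.isIn t name) = true
      · rw [if_pos ha, Nat.min_assoc, Nat.min_self]
      · rw [if_neg ha]

def pvCatAny (toks : List String) (n : String) : Bool := toks.any (fun t => PySem.Str.isIn t n)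

def pvR (n : String) : Nat :=
  if pvCatAny ["publish", "release", "deploy"] n then 0
  else if pvCatAny ["test", "candidate-fixes", "reproduce"] n then 1
  else if pvCatAny ["draft", "variants", "content"] n then 2
  else if pvCatAny ["extract", "transform", "load", "reconcile"] n then 3
  else 4

theorem pvR_le (n : String) : pvR n ≤ 4 := by
  unfold pvR; split_ifs <;> omega

theorem pv_name_fold_min (n : String) (b : Nat) (hb : b ≤ 4) :
    pvTokenRank.foldl (pvGStep n) b = min b (pvR n) := by
  have hsplit : pvTokenRank
      = (["publish", "release", "deploy"].map (fun t => (t, 0)))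
        ++ (["test", "candidate-fixes", "reproduce"].map (fun t => (t, 1)))
        ++ (["draft", "variants", "content"].map (fun t => (t, 2)))
        ++ (["extract", "transform", "load", "reconcile"].map (fun t => (t, 3))) := by rfl
  rw [hsplit, List.foldl_append, List.foldl_append, List.foldl_append,
    pv_catfold, pv_catfold, pv_catfold, pv_catfold]
  unfold pvR pvCatAny
  split_ifs <;> omega

def pvE (names : List String) : Nat :=
  if names.any (pvCatAny ["publish", "release", "deploy"]) then 0
  else if names.any (pvCatAny ["test", "candidate-fixes", "reproduce"]) then 1
  else if names.any (pvCatAny ["draft", "variants", "content"]) then 2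
  else if names.any (pvCatAny ["extract", "transform", "load", "reconcile"]) then 3
  else 4

theorem pvE_le (names : List String) : pvE names ≤ 4 := by
  unfold pvE; split_ifs <;> omega

theorem pv_min_chain (m0 m1 m2 m3 e0 e1 e2 e3 : Bool) :
    (if m0 || e0 then 0 else if m1 || e1 then 1 else if m2 || e2 then 2
     else if m3 || e3 then 3 else 4)
      = min (if m0 then 0 else if m1 then 1 else if m2 then 2 else if m3 then 3 else 4)
            (if e0 then 0 else if e1 then 1 else if e2 then 2 else if e3 then 3 else (4 : Nat)) := by
  revert m0 m1 m2 m3 e0 e1 e2 e3; decide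

theorem pv_outer (names : List String) : ∀ b : Nat, b ≤ 4 →
    names.foldl (fun b n => pvTokenRank.foldl (pvGStep n) b) b = min b (pvE names) := by
  induction names with
  | nil => intro b hb; simp [pvE]; omega
  | cons n rest ih =>
    intro b hb
    simp only [List.foldl_cons]
    rw [pv_name_fold_min n b hb]
    rw [ih _ (by have := pvR_le n; omega)]
    have hE : pvE (n :: rest) = min (pvR n) (pvE rest) := by
      simp only [pvE, pvR, List.any_cons]
      exact pv_min_chain _ _ _ _ _ _ _ _
    rw [hE]
    omega

theorem pv_anyCat3 (names : List String) (t1 t2 t3 : String) :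
    names.any (pvCatAny [t1, t2, t3])
      = ((names.any fun n => PySem.Str.isIn t1 n) || ((names.any fun n => PySem.Str.isIn t2 n)
          || ((names.any fun n => PySem.Str.isIn t3 n) || false))) := by
  have : pvCatAny [t1, t2, t3]
      = fun n => PySem.Str.isIn t1 n || (PySem.Str.isIn t2 n || (PySem.Str.isIn t3 n || false)) := by
    funext n
    simp only [pvCatAny, List.any_cons, List.any_nil]
  rw [this, pv_any_or3]

theorem pv_anyCat4 (names : List String) (t1 t2 t3 t4 : String) :
    names.any (pvCatAny [t1, t2, t3, t4])
      = ((names.any fun n => PySem.Str.isIn t1 n) || ((names.any fun n => PySem.Str.isIn t2 n)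
          || ((names.any fun n => PySem.Str.isIn t3 n)
            || ((names.any fun n => PySem.Str.isIn t4 n) || false)))) := by
  have : pvCatAny [t1, t2, t3, t4]
      = fun n => PySem.Str.isIn t1 n
          || (PySem.Str.isIn t2 n || (PySem.Str.isIn t3 n || (PySem.Str.isIn t4 n || false))) := by
    funext n
    simp only [pvCatAny, List.any_cons, List.any_nil]
  rw [this, pv_any_or4]

theorem pv_index (e0 e1 e2 e3 : Bool) :
    (PySem.List.pyGet? pvKinds (Int.ofNat
        (if e0 then 0 else if e1 then 1 else if e2 then 2 else if e3 then 3 else 4))).getD "generic"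
      = (if e0 then "release" else if e1 then "code-fix" else if e2 then "content-review"
         else if e3 then "etl" else "generic") := by
  cases e0 <;> cases e1 <;> cases e2 <;> cases e3 <;> rfl

-- ===== VERDICT (by name: the statement is the Claim_ definition above) =====
theorem infer_kind_from_steps_spec : Claim_equal_infer_kind_from_steps := by
  intro names _
  unfold Spec_infer_kind_from_steps infer_kind_from_steps infer_kind_from_steps_alt
  rw [pv_outer names 4 (by omega), Nat.min_eq_right (pvE_le names)]
  have hjoin : ∀ tok : String, tok.toList ≠ [] → ' ' ∉ tok.toList →
      PySem.Str.isIn tok (PySem.Str.join " " names)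
        = names.any (fun n => PySem.Str.isIn tok n) := fun tok h1 h2 => pv_isIn_join tok h1 h2 names
  simp only [List.any_cons, List.any_nil]
  simp only [hjoin "publish" (by decide) (by decide), hjoin "release" (by decide) (by decide),
    hjoin "deploy" (by decide) (by decide), hjoin "test" (by decide) (by decide),
    hjoin "candidate-fixes" (by decide) (by decide), hjoin "reproduce" (by decide) (by decide),
    hjoin "draft" (by decide) (by decide), hjoin "variants" (by decide) (by decide),
    hjoin "content" (by decide) (by decide), hjoin "extract" (by decide) (by decide),
    hjoin "transform" (by decide) (by decide), hjoin "load" (by decide) (by decide),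
    hjoin "reconcile" (by decide) (by decide)]
  unfold pvE
  rw [pv_index]
  -- both sides are now if-chains over ors of names.any; swap the quantifier order pointwise
  simp only [pv_anyCat3, pv_anyCat4]
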